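-- pv_equiv track=rewrite | github.com/ItemsLabs/clubz-admin | util/calc.py | get_rank_dict
-- ===== SOURCE A (Python) =====
-- def get_rank_dict(values):
--     values = sorted(values, reverse=True)
--
--     val_dict = dict()
--     position, real_position = 0, 0
--     prev_score = None
--     for val in values:
--         real_position += 1
--         if prev_score != val:
--             position = real_position
--         prev_score = val
--
--         val_dict[val] = position
--
--     return val_dict
-- ===== SOURCE B (Python) =====
-- def get_rank_dict(values):
--     counts = {}
--     for v in values:
--         counts[v] = counts.get(v, 0) + 1
--     result = {}
--     seen = 0
--     for val in sorted(counts, reverse=True):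
--         result[val] = seen + 1
--         seen += counts[val]
--     return result
-- ===== Notes on version B (the rewrite author's own statement) =====
-- stated objective: alternative
-- what changed: B builds a frequency table of the values in one pass and then assigns ranks by a single sweep over the distinct values in descending order with a running seen-count, instead of sorting all elements and tracking ties per element with prev_score.
import Mathlib
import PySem

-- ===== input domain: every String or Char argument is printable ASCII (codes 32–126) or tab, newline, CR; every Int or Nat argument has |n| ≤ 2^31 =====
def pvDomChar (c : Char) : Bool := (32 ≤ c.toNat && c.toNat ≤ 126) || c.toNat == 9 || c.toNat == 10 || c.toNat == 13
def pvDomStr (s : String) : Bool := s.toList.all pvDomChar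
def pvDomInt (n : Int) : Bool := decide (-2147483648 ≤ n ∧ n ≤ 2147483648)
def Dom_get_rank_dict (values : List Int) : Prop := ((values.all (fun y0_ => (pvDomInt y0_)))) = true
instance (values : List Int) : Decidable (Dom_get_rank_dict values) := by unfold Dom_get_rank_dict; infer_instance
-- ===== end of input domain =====

-- B replaces A's per-element sweep over the full sorted list (tie tracking via prev_score) by a
-- frequency table plus a descending sweep over the distinct values with a running seen-count (objective: alternative).

-- ===== PORT A =====
def get_rank_dict (values : List Int) : List (Int × Int) :=
  let values' := PySem.List.sorted values (fun x => x) true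
  let st := values'.foldl
    (fun (st : PySem.Dict Int Int × Int × Int × Option Int) val =>
      let real_position := st.2.2.1 + 1
      let position := if st.2.2.2 ≠ some val then real_position else st.2.1
      (st.1.insert val position, position, real_position, some val))
    (PySem.Dict.empty, 0, 0, none)
  st.1.items

-- ===== PORT B =====
def get_rank_dict_alt (values : List Int) : List (Int × Int) :=
  let counts := values.foldl (fun (d : PySem.Dict Int Int) v => d.insert v (d.getD v 0 + 1)) PySem.Dict.empty
  let st := (PySem.List.sorted counts.keys (fun x => x) true).foldl
    (fun (st : PySem.Dict Int Int × Int) val => (st.1.insert val (st.2 + 1), st.2 + counts.getD val 0))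
    (PySem.Dict.empty, 0)
  st.1.items

-- ===== PRECONDITION & SPEC =====
def Spec_get_rank_dict (values : List Int) (out : List (Int × Int)) : Prop := out = get_rank_dict_alt values
instance (values : List Int) (out : List (Int × Int)) : Decidable (Spec_get_rank_dict values out) := by unfold Spec_get_rank_dict; infer_instance

-- ===== CLAIM (what is proved, stated in full; the proofs are below) =====
def Claim_equal_get_rank_dict : Prop := ∀ (values : List Int), Dom_get_rank_dict values → Spec_get_rank_dict values (get_rank_dict values)

-- ===== LEMMAS AND PROOFS =====

-- the entry list A's loop emits: rank rp+1 at each first occurrence, duplicates skipped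
def rankAS : List Int → Int → Option Int → List (Int × Int)
  | [], _, _ => []
  | v :: t, rp, prev =>
      if prev = some v then rankAS t (rp + 1) prev
      else (v, rp + 1) :: rankAS t (rp + 1) (some v)

-- the entry list B's loop emits: seen+1 per distinct key, seen advanced by the key's multiplicity
def rankBS (vals : List Int) : List Int → Int → List (Int × Int)
  | [], _ => []
  | v :: kt, seen => (v, seen + 1) :: rankBS vals kt (seen + (vals.count v : Int))

theorem insert_eq_self_of_get? (d : PySem.Dict Int Int) (k v : Int)
    (hnd : d.keys.Nodup) (h : d.get? k = some v) : d.insert k v = d := by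
  have hc : d.contains k = true := by
    rw [PySem.Dict.contains_eq_isSome_get?, h]; rfl
  apply PySem.Dict.ext
  rw [PySem.Dict.items_insert_of_contains d v hc]
  conv_rhs => rw [← List.map_id d.items]
  apply List.map_congr_left
  intro q hq
  obtain ⟨q1, q2⟩ := q
  by_cases hk : q1 = k
  · subst hk
    have hget : d.get? q1 = some q2 := PySem.Dict.get?_of_mem_items d hq hnd
    rw [h] at hget
    simp [Option.some_inj.mp hget]
  · simp [hk]

theorem A_fold (s : List Int) : ∀ (d : PySem.Dict Int Int) (pos rp : Int) (prev : Option Int),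
    s.Pairwise (fun a b => b ≤ a) →
    d.keys.Nodup →
    (∀ p, prev = some p → d.get? p = some pos ∧ (∀ x ∈ s, x ≤ p) ∧ (∀ k ∈ d.keys, p ≤ k)) →
    (prev = none → d.items = []) →
    (s.foldl
      (fun (st : PySem.Dict Int Int × Int × Int × Option Int) val =>
        let real_position := st.2.2.1 + 1
        let position := if st.2.2.2 ≠ some val then real_position else st.2.1
        (st.1.insert val position, position, real_position, some val))
      (d, pos, rp, prev)).1.items = d.items ++ rankAS s rp prev := by
  induction s with
  | nil => intro d pos rp prev _ _ _ _; simp [rankAS]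
  | cons v t ih =>
    intro d pos rp prev hpw hnd hprev hnone
    have hpwt : t.Pairwise (fun a b => b ≤ a) := (List.pairwise_cons.mp hpw).2
    have hub : ∀ x ∈ t, x ≤ v := (List.pairwise_cons.mp hpw).1
    by_cases hpv : prev = some v
    · -- duplicate of prev: the insert is a no-op
      obtain ⟨hget, hle, hkey⟩ := hprev v hpv
      subst hpv
      simp only [List.foldl_cons]
      rw [if_neg (show ¬((some v : Option Int) ≠ some v) from by simp)]
      rw [insert_eq_self_of_get? d v pos hnd hget]
      rw [ih d pos (rp + 1) (some v) hpwt hnd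
          (fun p hp => by
            rw [← Option.some_inj.mp hp]
            exact ⟨hget, hub, hkey⟩)
          (fun h => absurd h (by simp))]
      simp [rankAS]
    · -- new distinct value: appended with rank rp+1
      have hvd : v ∉ d.keys := by
        intro hmem
        cases prev with
        | none =>
          have := hnone rfl
          simp only [PySem.Dict.keys, this] at hmem
          simp at hmem
        | some p =>
          obtain ⟨_, hle, hkey⟩ := hprev p rfl
          have h1 : v ≤ p := hle v (by simp)
          have h2 : p ≤ v := hkey v hmem
          exact hpv (by rw [le_antisymm h1 h2])
      have hcont : d.contains v = false := by
        rw [PySem.Dict.contains_eq_decide_mem_keys]; simpa using hvd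
      simp only [List.foldl_cons]
      rw [if_pos hpv]
      rw [ih (d.insert v (rp + 1)) (rp + 1) (rp + 1) (some v) hpwt
            (PySem.Dict.nodup_keys_insert d v (rp + 1) hnd)
            (fun p hp => by
              rw [← Option.some_inj.mp hp]
              refine ⟨PySem.Dict.get?_insert_self _ _ _, hub, ?_⟩
              intro k hk
              rw [PySem.Dict.keys_insert_of_not_contains d (rp + 1) hcont] at hk
              rcases List.mem_append.mp hk with hk | hk
              · cases prev with
                | none =>
                  have := hnone rfl
                  simp only [PySem.Dict.keys, this] at hk
                  simp at hk
                | some p' =>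
                  obtain ⟨_, hle', hkey'⟩ := hprev p' rfl
                  exact le_trans (hle' v (by simp)) (hkey' k hk)
              · simp only [List.mem_singleton] at hk
                exact le_of_eq hk.symm)
            (fun h => absurd h (by simp))]
      rw [PySem.Dict.items_insert_of_not_contains d (rp + 1) hcont]
      simp [rankAS, if_neg hpv]

theorem B_fold (vals : List Int) (ks : List Int) : ∀ (d : PySem.Dict Int Int) (seen : Int),
    (∀ v ∈ ks, d.contains v = false) → ks.Nodup →
    (ks.foldl
      (fun (st : PySem.Dict Int Int × Int) val =>
        (st.1.insert val (st.2 + 1), st.2 + (PySem.Dict.counter vals).getD val 0))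
      (d, seen)).1.items = d.items ++ rankBS vals ks seen := by
  induction ks with
  | nil => intro d seen _ _; simp [rankBS]
  | cons v kt ih =>
    intro d seen hfresh hnd
    simp only [List.foldl_cons]
    rw [ih (d.insert v (seen + 1)) _
          (fun w hw => by
            rw [PySem.Dict.contains_insert]
            have hwv : ¬(w = v) := fun h => (List.nodup_cons.mp hnd).1 (h ▸ hw)
            simp [hwv, hfresh w (by simp [hw])])
          (List.nodup_cons.mp hnd).2]
    rw [PySem.Dict.items_insert_of_not_contains d (seen + 1) (hfresh v (by simp))]
    simp [rankBS, PySem.Dict.getD_counter]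

theorem rank_main (vals : List Int) : ∀ (s ks : List Int) (rp seen : Int) (prev : Option Int),
    s.Pairwise (fun a b => b ≤ a) →
    ks.Pairwise (fun a b => b < a) →
    (∀ x, x ∈ ks ↔ (x ∈ s ∧ prev ≠ some x)) →
    (∀ p, prev = some p → (∀ x ∈ s, x ≤ p) ∧ seen = rp + (s.count p : Int)) →
    (prev = none → seen = rp) →
    (∀ x ∈ s, prev ≠ some x → (vals.count x : Int) = (s.count x : Int)) →
    rankAS s rp prev = rankBS vals ks seen := by
  intro s
  induction s with
  | nil =>
    intro ks rp seen prev _ _ hks _ _ _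
    have : ks = [] := List.eq_nil_iff_forall_not_mem.mpr (fun x hx => by
      simpa using (hks x).mp hx)
    simp [this, rankAS, rankBS]
  | cons v t ih =>
    intro ks rp seen prev hpw hkpw hks hp hnone hcnt
    have hpwt : t.Pairwise (fun a b => b ≤ a) := (List.pairwise_cons.mp hpw).2
    have hub : ∀ x ∈ t, x ≤ v := (List.pairwise_cons.mp hpw).1
    by_cases hpv : prev = some v
    · -- skip a duplicate of prev
      subst hpv
      simp only [rankAS, reduceIte]
      refine ih ks (rp + 1) seen (some v) hpwt hkpw ?_ ?_
        (fun h => absurd h (by simp)) ?_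
      · intro x
        constructor
        · intro hx
          obtain ⟨hxs, hxp⟩ := (hks x).mp hx
          have hxv : ¬(x = v) := fun h => hxp (congrArg some h.symm)
          exact ⟨(List.mem_cons.mp hxs).resolve_left hxv, hxp⟩
        · intro ⟨hxt, hxp⟩
          exact (hks x).mpr ⟨List.mem_cons_of_mem v hxt, hxp⟩
      · intro p hpp
        rw [← Option.some_inj.mp hpp]
        obtain ⟨hle, hseen⟩ := hp v rfl
        refine ⟨hub, ?_⟩
        rw [hseen, List.count_cons_self]
        push_cast
        ring
      · intro x hxt hxp
        have hxv : ¬(x = v) := fun h => hxp (congrArg some h.symm)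
        rw [hcnt x (List.mem_cons_of_mem v hxt) hxp]
        have h1 : ¬(v = x) := fun h => hxv h.symm
        norm_cast
        simp [h1]
    · -- emit v: head of ks must be v, and seen = rp here
      have hpns : ∀ p, prev = some p → p ∉ v :: t := by
        intro p hpp hmem
        obtain ⟨hle, _⟩ := hp p hpp
        have h1 : p ≤ v := by
          rcases List.mem_cons.mp hmem with h | h
          · exact le_of_eq h
          · exact hub p h
        have h2 : v ≤ p := hle v (by simp)
        exact hpv (by rw [hpp, le_antisymm h2 h1])
      have hseen : seen = rp := by
        cases prev with
        | none => exact hnone rfl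
        | some p =>
          obtain ⟨_, hseen⟩ := hp p rfl
          rw [hseen, List.count_eq_zero_of_not_mem (hpns p rfl)]
          simp
      have hvks : v ∈ ks := (hks v).mpr ⟨by simp, hpv⟩
      cases ks with
      | nil => cases hvks
      | cons k0 kt =>
        have hk0v : k0 = v := by
          rcases List.mem_cons.mp hvks with h | h
          · exact h.symm
          · exfalso
            have hlt : v < k0 := (List.pairwise_cons.mp hkpw).1 v h
            have hk0s : k0 ∈ v :: t := ((hks k0).mp (by simp)).1
            have : k0 ≤ v := by
              rcases List.mem_cons.mp hk0s with h' | h'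
              · exact le_of_eq h'
              · exact hub k0 h'
            omega
        rw [hk0v] at hkpw hks
        have hktpw : kt.Pairwise (fun a b => b < a) := (List.pairwise_cons.mp hkpw).2
        have hktlt : ∀ x ∈ kt, x < v := (List.pairwise_cons.mp hkpw).1
        simp only [rankAS, if_neg hpv, rankBS, hk0v, hseen]
        have hcv : (vals.count v : Int) = ((v :: t).count v : Int) :=
          hcnt v (by simp) hpv
        congr 1
        refine ih kt (rp + 1) (rp + (vals.count v : Int)) (some v) hpwt hktpw ?_ ?_
          (fun h => absurd h (by simp)) ?_
        · intro x
          constructor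
          · intro hx
            have hxks := (hks x).mp (List.mem_cons_of_mem v hx)
            have hxv : ¬(x = v) := by
              intro h
              have := hktlt x hx
              omega
            exact ⟨(List.mem_cons.mp hxks.1).resolve_left hxv,
              fun h => hxv (Option.some_inj.mp h).symm⟩
          · intro ⟨hxt, hxv⟩
            have hxv' : ¬(x = v) := fun h => hxv (congrArg some h.symm)
            have hxprev : prev ≠ some x := fun h => hpns x h (List.mem_cons_of_mem v hxt)
            have hxin : x ∈ v :: kt := (hks x).mpr ⟨List.mem_cons_of_mem v hxt, hxprev⟩
            exact (List.mem_cons.mp hxin).resolve_left hxv'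
        · intro p hpp
          rw [← Option.some_inj.mp hpp]
          refine ⟨hub, ?_⟩
          rw [hcv, List.count_cons_self]
          push_cast
          ring
        · intro x hxt hxv
          have hxv' : ¬(x = v) := fun h => hxv (congrArg some h.symm)
          have hxprev : prev ≠ some x := fun h => hpns x h (List.mem_cons_of_mem v hxt)
          rw [hcnt x (List.mem_cons_of_mem v hxt) hxprev]
          have h1 : ¬(v = x) := fun h => hxv' h.symm
          norm_cast
          simp [h1]

-- ===== VERDICT (by name: the statement is the Claim_ definition above) =====
theorem get_rank_dict_spec : Claim_equal_get_rank_dict := by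
  intro values _
  unfold Spec_get_rank_dict
  have hA : get_rank_dict values = rankAS (PySem.List.sorted values (fun x => x) true) 0 none := by
    simp only [get_rank_dict]
    rw [A_fold _ PySem.Dict.empty 0 0 none
        (by simpa using PySem.List.sorted_pairwise_rev values (fun x => x))
        (by simp [pysem])
        (fun p hp => absurd hp (by simp))
        (fun _ => rfl)]
    simp [PySem.Dict.empty]
  have hB : get_rank_dict_alt values
      = rankBS values (PySem.List.sorted (PySem.Set.ofList values) (fun x => x) true) 0 := by
    simp only [get_rank_dict_alt, PySem.Dict.foldl_insert_getD_add_one_eq_counter,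
      PySem.Dict.keys_counter]
    rw [B_fold values _ PySem.Dict.empty 0
        (fun w _ => by simp [pysem])
        (((PySem.List.sorted_perm (PySem.Set.ofList values) (fun x => x) true).nodup_iff).mpr
          (PySem.Set.nodup_ofList values))]
    simp [PySem.Dict.empty]
  rw [hA, hB]
  have hkpge : (PySem.List.sorted (PySem.Set.ofList values) (fun x => x) true).Pairwise
      (fun a b => b ≤ a) := by
    simpa using PySem.List.sorted_pairwise_rev (PySem.Set.ofList values) (fun x => x)
  have hknd : (PySem.List.sorted (PySem.Set.ofList values) (fun x => x) true).Nodup :=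
    ((PySem.List.sorted_perm (PySem.Set.ofList values) (fun x => x) true).nodup_iff).mpr
      (PySem.Set.nodup_ofList values)
  refine rank_main values _ _ 0 0 none
    (by simpa using PySem.List.sorted_pairwise_rev values (fun x => x))
    ((hkpge.and hknd).imp (fun h => lt_of_le_of_ne h.1 (fun he => h.2 he.symm)))
    ?_ (fun p hp => absurd hp (by simp)) (fun _ => rfl) ?_
  · intro x
    simp [PySem.List.mem_sorted, PySem.Set.mem_ofList]
  · intro x _ _
    exact_mod_cast ((PySem.List.sorted_perm values (fun x => x) true).count_eq x).symm
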